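-- pv_equiv track=rewrite | github.com/ylkangpeter/sts2-rl | src/st2rl/gameplay/heuristics.py | _deck_archetype_anchors
-- ===== SOURCE A (Python) =====
-- from typing import Any
--
-- _ARCHETYPE_CARD_WEIGHTS: dict[str, dict[str, float]] = {
--     "strength": {
--         "CARD.INFLAME": 3.0,
--         "CARD.FIGHT_ME": 2.8,
--         "CARD.RUPTURE": 2.6,
--         "CARD.DEMON_FORM": 3.5,
--         "CARD.TWIN_STRIKE": 1.4,
--         "CARD.SWORD_BOOMERANG": 1.5,
--         "CARD.THRASH": 2.0,
--         "CARD.UPPERCUT": 1.2,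
--         "CARD.WHIRLWIND": 1.0,
--     },
--     "block": {
--         "CARD.BODY_SLAM": 3.2,
--         "CARD.SHRUG_IT_OFF": 2.2,
--         "CARD.TRUE_GRIT": 0.4,
--         "CARD.FLAME_BARRIER": 2.4,
--         "CARD.TAUNT": 2.0,
--         "CARD.STONE_ARMOR": 2.2,
--         "CARD.JUGGERNAUT": 2.8,
--         "CARD.BARRICADE": 3.2,
--         "CARD.CRIMSON_MANTLE": 1.5,
--         "CARD.IMPERVIOUS": 2.3,
--     },
--     "exhaust": {
--         "CARD.CORRUPTION": 4.0,
--         "CARD.DARK_EMBRACE": 3.8,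
--         "CARD.FEEL_NO_PAIN": 3.5,
--         "CARD.TRUE_GRIT": 0.6,
--         "CARD.BURNING_PACT": 2.5,
--         "CARD.FORGOTTEN_RITUAL": 2.0,
--         "CARD.BRAND": 2.2,
--         "CARD.OFFERING": 2.5,
--         "CARD.PACTS_END": 2.8,
--         "CARD.ASHEN_STRIKE": 1.7,
--         "CARD.THRASH": 1.6,
--         "CARD.JUGGERNAUT": 1.7,
--         "CARD.BODY_SLAM": 1.6,
--         "CARD.EVIL_EYE": 1.6,
--     },
--     "bloodletting": {
--         "CARD.BLOODLETTING": 3.4,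
--         "CARD.RUPTURE": 3.2,
--         "CARD.INFERNO": 3.0,
--         "CARD.BREAKTHROUGH": 2.3,
--         "CARD.HEMOKINESIS": 2.2,
--         "CARD.CRIMSON_MANTLE": 2.1,
--         "CARD.OFFERING": 2.3,
--         "CARD.BRAND": 1.8,
--         "CARD.FEED": 1.8,
--         "CARD.TEAR_ASUNDER": 2.2,
--         "CARD.POMMEL_STRIKE": 1.7,
--         "CARD.SHRUG_IT_OFF": 1.5,
--         "CARD.BURNING_PACT": 1.6,
--         "CARD.BATTLE_TRANCE": 1.7,
--     },
--     "strike": {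
--         "CARD.PERFECTED_STRIKE": 3.0,
--         "CARD.POMMEL_STRIKE": 2.5,
--         "CARD.TWIN_STRIKE": 2.0,
--         "CARD.BREAKTHROUGH": 1.8,
--         "CARD.TREMBLE": 1.2,
--         "CARD.TAUNT": 1.8,
--         "CARD.EXPECT_A_FIGHT": 2.0,
--         "CARD.PYRE": 1.8,
--         "CARD.HELLRAISER": 2.4,
--         "CARD.COLOSSUS": 1.8,
--         "CARD.CRUELTY": 1.6,
--         "CARD.UPPERCUT": 1.4,
--     },
-- }
--
-- _ARCHETYPE_ANCHORS: dict[str, set[str]] = {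
--     "strength": {"CARD.INFLAME", "CARD.FIGHT_ME", "CARD.RUPTURE", "CARD.DEMON_FORM"},
--     "block": {"CARD.BODY_SLAM", "CARD.JUGGERNAUT", "CARD.BARRICADE", "CARD.STONE_ARMOR"},
--     "exhaust": {"CARD.CORRUPTION", "CARD.DARK_EMBRACE", "CARD.FEEL_NO_PAIN"},
--     "bloodletting": {"CARD.BLOODLETTING", "CARD.RUPTURE", "CARD.INFERNO", "CARD.CRIMSON_MANTLE"},
--     "strike": {"CARD.PERFECTED_STRIKE", "CARD.HELLRAISER", "CARD.EXPECT_A_FIGHT"},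
-- }
--
-- def _card_id(card: dict[str, Any]) -> str:
--     return str(card.get("id") or "").strip().upper()
--
-- def _deck_archetype_anchors(deck: list[dict[str, Any]]) -> dict[str, int]:
--     anchors = {name: 0 for name in _ARCHETYPE_CARD_WEIGHTS}
--     for card in deck:
--         if not isinstance(card, dict):
--             continue
--         card_id = _card_id(card)
--         for name, anchor_ids in _ARCHETYPE_ANCHORS.items():
--             if card_id in anchor_ids:
--                 anchors[name] += 1
--     return anchors
-- ===== SOURCE B (Python) =====
-- from typing import Any
--
-- _ARCHETYPE_ANCHORS: dict[str, set[str]] = {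
--     "strength": {"CARD.INFLAME", "CARD.FIGHT_ME", "CARD.RUPTURE", "CARD.DEMON_FORM"},
--     "block": {"CARD.BODY_SLAM", "CARD.JUGGERNAUT", "CARD.BARRICADE", "CARD.STONE_ARMOR"},
--     "exhaust": {"CARD.CORRUPTION", "CARD.DARK_EMBRACE", "CARD.FEEL_NO_PAIN"},
--     "bloodletting": {"CARD.BLOODLETTING", "CARD.RUPTURE", "CARD.INFERNO", "CARD.CRIMSON_MANTLE"},
--     "strike": {"CARD.PERFECTED_STRIKE", "CARD.HELLRAISER", "CARD.EXPECT_A_FIGHT"},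
-- }
--
-- # Reverse index: card_id -> list of archetype names whose anchor set contains it
-- # (names in _ARCHETYPE_ANCHORS order; a card id may anchor several archetypes).
-- _ANCHOR_INDEX: dict[str, list[str]] = {}
-- for _name, _ids in _ARCHETYPE_ANCHORS.items():
--     for _cid in _ids:
--         _ANCHOR_INDEX.setdefault(_cid, []).append(_name)
--
-- def _card_id(card: dict[str, Any]) -> str:
--     return str(card.get("id") or "").strip().upper()
--
-- def _deck_archetype_anchors(deck: list[dict[str, Any]]) -> dict[str, int]:
--     anchors = {name: 0 for name in _ARCHETYPE_ANCHORS}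
--     for card in deck:
--         if not isinstance(card, dict):
--             continue
--         for name in _ANCHOR_INDEX.get(_card_id(card), ()):
--             anchors[name] += 1
--     return anchors
-- ===== Notes on version B (the rewrite author's own statement) =====
-- stated objective: idiomatic
-- what changed: Replaces the per-card inner scan over all five archetype anchor sets with a precomputed reverse index from card id to the archetype names it anchors, so the deck loop touches only matching archetypes.
import Mathlib
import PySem

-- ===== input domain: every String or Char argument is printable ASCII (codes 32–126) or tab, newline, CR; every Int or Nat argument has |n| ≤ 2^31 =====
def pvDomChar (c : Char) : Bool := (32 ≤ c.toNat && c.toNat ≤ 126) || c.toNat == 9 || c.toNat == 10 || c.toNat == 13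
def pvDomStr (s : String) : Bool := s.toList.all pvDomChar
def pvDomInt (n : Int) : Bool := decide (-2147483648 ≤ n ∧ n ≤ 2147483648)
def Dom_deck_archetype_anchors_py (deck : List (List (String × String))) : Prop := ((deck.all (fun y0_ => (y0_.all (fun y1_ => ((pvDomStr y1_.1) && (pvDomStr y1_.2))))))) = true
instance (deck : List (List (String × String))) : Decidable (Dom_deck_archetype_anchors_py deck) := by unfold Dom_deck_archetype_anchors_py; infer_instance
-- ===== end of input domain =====

-- B replaces A's per-card scan of all five archetype anchor sets with a precomputed
-- reverse index card_id -> anchored archetype names (objective: more idiomatic single-pass deck loop).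
-- Under the type convention every deck entry is a dict, so A's `isinstance(card, dict)` guard is always true.

-- ===== PORT A =====
-- shared module constant _ARCHETYPE_ANCHORS (dict of sets, insertion order)
def pvAnchorsTable : List (String × PySem.Set String) :=
  [("strength", PySem.Set.ofList ["CARD.INFLAME","CARD.FIGHT_ME","CARD.RUPTURE","CARD.DEMON_FORM"]),
   ("block", PySem.Set.ofList ["CARD.BODY_SLAM","CARD.JUGGERNAUT","CARD.BARRICADE","CARD.STONE_ARMOR"]),
   ("exhaust", PySem.Set.ofList ["CARD.CORRUPTION","CARD.DARK_EMBRACE","CARD.FEEL_NO_PAIN"]),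
   ("bloodletting", PySem.Set.ofList ["CARD.BLOODLETTING","CARD.RUPTURE","CARD.INFERNO","CARD.CRIMSON_MANTLE"]),
   ("strike", PySem.Set.ofList ["CARD.PERFECTED_STRIKE","CARD.HELLRAISER","CARD.EXPECT_A_FIGHT"])]

-- shared helper _card_id: str(card.get("id") or "").strip().upper()
def pvCardId (card : List (String × String)) : String :=
  let s : String := match (PySem.Dict.mk card).get? "id" with
    | none => ""                       -- card.get("id") is None -> `or` yields ""
    | some v => if v = "" then "" else v  -- `or`: an empty string is falsy
  PySem.Str.upper (PySem.Str.strip s)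

-- {name: 0 for name in _ARCHETYPE_CARD_WEIGHTS}: the weights dict's keys, in order
def pvInitAnchorsA : PySem.Dict String Int :=
  PySem.Dict.mk [("strength",0),("block",0),("exhaust",0),("bloodletting",0),("strike",0)]

def deck_archetype_anchors_py (deck : List (List (String × String))) : List (String × Int) :=
  (deck.foldl (fun anchors card =>
      let cid := pvCardId card
      pvAnchorsTable.foldl
        (fun a p => if PySem.Set.contains p.2 cid then a.modify p.1 0 (· + 1) else a)
        anchors)
    pvInitAnchorsA).items

-- ===== PORT B =====
-- module-level reverse index: for name, ids in _ARCHETYPE_ANCHORS: for cid in ids: _ANCHOR_INDEX.setdefault(cid, []).append(name)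
-- (the inner set's iteration order only affects which cid's entry is touched first, never an entry's value)
def pvAnchorIndex : PySem.Dict String (List String) :=
  pvAnchorsTable.foldl (fun idx p =>
    p.2.foldl (fun idx2 cid => idx2.insert cid ((idx2.getD cid []) ++ [p.1])) idx) PySem.Dict.empty

def deck_archetype_anchors_py_alt (deck : List (List (String × String))) : List (String × Int) :=
  (deck.foldl (fun anchors card =>
      (pvAnchorIndex.getD (pvCardId card) []).foldl
        (fun a name => a.modify name 0 (· + 1)) anchors)
    (PySem.Dict.mk (pvAnchorsTable.map (fun p => (p.1, (0 : Int)))))).items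

-- ===== PRECONDITION & SPEC =====
def Spec_deck_archetype_anchors_py (deck : List (List (String × String))) (out : List (String × Int)) : Prop := out = deck_archetype_anchors_py_alt deck
instance (deck : List (List (String × String))) (out : List (String × Int)) : Decidable (Spec_deck_archetype_anchors_py deck out) := by unfold Spec_deck_archetype_anchors_py; infer_instance

-- ===== CLAIM (what is proved, stated in full; the proofs are below) =====
def Claim_equal_deck_archetype_anchors_py : Prop := ∀ (deck : List (List (String × String))), Dom_deck_archetype_anchors_py deck → Spec_deck_archetype_anchors_py deck (deck_archetype_anchors_py deck)

-- ===== LEMMAS AND PROOFS =====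

-- one card's effect on the counter dict is the same in both programs
theorem pv_step_eq (cid : String) (d : PySem.Dict String Int) :
    pvAnchorsTable.foldl (fun a p => if PySem.Set.contains p.2 cid then a.modify p.1 0 (· + 1) else a) d
      = (pvAnchorIndex.getD cid []).foldl (fun a name => a.modify name 0 (· + 1)) d := by
  by_cases h1 : cid = "CARD.INFLAME"; · subst h1; rfl
  by_cases h2 : cid = "CARD.FIGHT_ME"; · subst h2; rfl
  by_cases h3 : cid = "CARD.RUPTURE"; · subst h3; rfl
  by_cases h4 : cid = "CARD.DEMON_FORM"; · subst h4; rfl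
  by_cases h5 : cid = "CARD.BODY_SLAM"; · subst h5; rfl
  by_cases h6 : cid = "CARD.JUGGERNAUT"; · subst h6; rfl
  by_cases h7 : cid = "CARD.BARRICADE"; · subst h7; rfl
  by_cases h8 : cid = "CARD.STONE_ARMOR"; · subst h8; rfl
  by_cases h9 : cid = "CARD.CORRUPTION"; · subst h9; rfl
  by_cases h10 : cid = "CARD.DARK_EMBRACE"; · subst h10; rfl
  by_cases h11 : cid = "CARD.FEEL_NO_PAIN"; · subst h11; rfl
  by_cases h12 : cid = "CARD.BLOODLETTING"; · subst h12; rfl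
  by_cases h13 : cid = "CARD.INFERNO"; · subst h13; rfl
  by_cases h14 : cid = "CARD.CRIMSON_MANTLE"; · subst h14; rfl
  by_cases h15 : cid = "CARD.PERFECTED_STRIKE"; · subst h15; rfl
  by_cases h16 : cid = "CARD.HELLRAISER"; · subst h16; rfl
  by_cases h17 : cid = "CARD.EXPECT_A_FIGHT"; · subst h17; rfl
  -- cid anchors no archetype: A's inner loop is five skipped branches, B's lookup is empty
  simp [pvAnchorsTable, pvAnchorIndex, PySem.Set.contains, PySem.Set.ofList, PySem.Set.add,
        PySem.Dict.getD, PySem.Dict.get?, PySem.Dict.insert, PySem.Dict.empty, List.find?,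
        h1,h2,h3,h4,h5,h6,h7,h8,h9,h10,h11,h12,h13,h14,h15,h16,h17,
        beq_eq_false_iff_ne.mpr (Ne.symm h1), beq_eq_false_iff_ne.mpr (Ne.symm h2),
        beq_eq_false_iff_ne.mpr (Ne.symm h3), beq_eq_false_iff_ne.mpr (Ne.symm h4),
        beq_eq_false_iff_ne.mpr (Ne.symm h5), beq_eq_false_iff_ne.mpr (Ne.symm h6),
        beq_eq_false_iff_ne.mpr (Ne.symm h7), beq_eq_false_iff_ne.mpr (Ne.symm h8),
        beq_eq_false_iff_ne.mpr (Ne.symm h9), beq_eq_false_iff_ne.mpr (Ne.symm h10),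
        beq_eq_false_iff_ne.mpr (Ne.symm h11), beq_eq_false_iff_ne.mpr (Ne.symm h12),
        beq_eq_false_iff_ne.mpr (Ne.symm h13), beq_eq_false_iff_ne.mpr (Ne.symm h14),
        beq_eq_false_iff_ne.mpr (Ne.symm h15), beq_eq_false_iff_ne.mpr (Ne.symm h16),
        beq_eq_false_iff_ne.mpr (Ne.symm h17)]

theorem pv_fold_eq (deck : List (List (String × String))) (d : PySem.Dict String Int) :
    deck.foldl (fun anchors card =>
        pvAnchorsTable.foldl
          (fun a p => if PySem.Set.contains p.2 (pvCardId card) then a.modify p.1 0 (· + 1) else a)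
          anchors) d
      = deck.foldl (fun anchors card =>
          (pvAnchorIndex.getD (pvCardId card) []).foldl
            (fun a name => a.modify name 0 (· + 1)) anchors) d := by
  induction deck generalizing d with
  | nil => simp only [List.foldl_nil]
  | cons c t ih => simp only [List.foldl_cons]; rw [pv_step_eq]; exact ih _

-- ===== VERDICT (by name: the statement is the Claim_ definition above) =====
theorem deck_archetype_anchors_py_spec : Claim_equal_deck_archetype_anchors_py := by
  intro deck _
  show deck_archetype_anchors_py deck = deck_archetype_anchors_py_alt deck
  unfold deck_archetype_anchors_py deck_archetype_anchors_py_alt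
  rw [pv_fold_eq, show PySem.Dict.mk (pvAnchorsTable.map (fun p => (p.1, (0 : Int)))) = pvInitAnchorsA from by decide]
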